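-- pv_equiv track=rewrite | github.com/AtoBrightSide/contests | contest-3-feb18/C_Distinct_Split.py | solution
-- ===== SOURCE A (Python) =====
-- def solution(s):
--
--     def helper(tracker, count, seen, my_s):
--         for i, ch in enumerate(my_s):
--             tracker.append(count)
--             if ch not in seen:
--                 seen.add(ch)
--                 count += 1
--         tracker.append(count)
--         return tracker
--
--     toLeft = helper([], 0, set(), s)
--     toRight = helper([], 0, set(), s[::-1])[::-1]
--     toRight = toRight[:-1]
--     max_val = 0
--
--     for i in range(len(s)):
--         max_val = max(max_val, toLeft[i] + toRight[i])
--
--     return max_val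
-- ===== SOURCE B (Python) =====
-- def solution(s):
--     last = {}
--     for i, ch in enumerate(s):
--         last[ch] = i
--     best, left, right = 0, set(), len(set(s))
--     for i, ch in enumerate(s):
--         best = max(best, len(left) + right)
--         left.add(ch)
--         if last[ch] == i:
--             right -= 1
--     return best
-- ===== Notes on version B (the rewrite author's own statement) =====
-- stated objective: alternative
-- what changed: Replaces the two precomputed prefix/suffix distinct-count arrays (built by a helper run forwards and on the reversed string, then combined in an index loop) by a single forward pass that keeps a live left set and a running right distinct count, decremented at each character's last occurrence (found via a last-occurrence dict built once).
import Mathlib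
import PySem

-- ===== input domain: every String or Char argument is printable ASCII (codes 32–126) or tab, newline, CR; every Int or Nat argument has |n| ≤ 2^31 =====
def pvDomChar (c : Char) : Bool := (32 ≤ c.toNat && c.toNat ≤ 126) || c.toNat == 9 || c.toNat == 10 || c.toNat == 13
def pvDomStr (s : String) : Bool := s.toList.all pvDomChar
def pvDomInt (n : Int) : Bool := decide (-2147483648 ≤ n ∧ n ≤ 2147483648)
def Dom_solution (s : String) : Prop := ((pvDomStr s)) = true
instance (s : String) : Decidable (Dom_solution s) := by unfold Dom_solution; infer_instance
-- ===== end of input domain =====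

-- B replaces A's two precomputed prefix/suffix distinct-count arrays by one forward pass
-- keeping a live left set and a running right distinct count (decremented at each
-- character's last occurrence, read off a last-occurrence dict built once): an
-- alternative decomposition of the same O(n) computation.

-- ===== PORT A =====
-- Python helper(tracker, count, seen, my_s): the enumerate index i is unused, so the fold is over the chars.
def helperA : List Char → List Int → Int → PySem.Set Char → List Int
  | [], tracker, count, _seen => tracker ++ [count]
  | ch :: rest, tracker, count, seen =>
    if !(PySem.Set.contains seen ch) then
      helperA rest (tracker ++ [count]) (count + 1) (PySem.Set.add seen ch)
    else
      helperA rest (tracker ++ [count]) count seen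

def solution (s : String) : Int :=
  let toLeft := helperA s.toList [] 0 PySem.Set.empty
  -- s[::-1] is reversal (PySem.List.slice?_none_none_neg_one); Python's toRight[:-1] is the slice below
  let toRight := PySem.List.slice ((helperA s.toList.reverse [] 0 PySem.Set.empty).reverse) none (some (-1))
  -- toLeft[i] / toRight[i] are always in range (lengths n+1 and n, i < n), so pyGetD's default is never used
  (PySem.List.pyRange 0 (PySem.Str.len s) 1).foldl
    (fun max_val i => max max_val (PySem.List.pyGetD toLeft i 0 + PySem.List.pyGetD toRight i 0)) 0

-- ===== PORT B =====
def solution_alt (s : String) : Int :=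
  let w := s.toList
  let last := (PySem.List.enumerate w 0).foldl (fun d p => d.insert p.2 p.1) (PySem.Dict.empty : PySem.Dict Char Int)
  -- last[ch] in Python cannot raise (every ch of s is a key), so getD's default is never used
  let st := (PySem.List.enumerate w 0).foldl
    (fun (st : Int × PySem.Set Char × Int) p =>
      (max st.1 (PySem.Set.len st.2.1 + st.2.2),
       PySem.Set.add st.2.1 p.2,
       if PySem.Dict.getD last p.2 (-1) == p.1 then st.2.2 - 1 else st.2.2))
    (0, PySem.Set.empty, ((PySem.Set.ofList w).length : Int))
  st.1

-- ===== PRECONDITION & SPEC =====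
def Spec_solution (s : String) (out : Int) : Prop := out = solution_alt s
instance (s : String) (out : Int) : Decidable (Spec_solution s out) := by unfold Spec_solution; infer_instance

-- ===== CLAIM (what is proved, stated in full; the proofs are below) =====
def Claim_equal_solution : Prop := ∀ (s : String), Dom_solution s → Spec_solution s (solution s)

-- ===== LEMMAS AND PROOFS =====

-- number of distinct chars of a list, as Python's len(set(l))
def dcount (l : List Char) : Int := ((PySem.Set.ofList l).length : Int)

-- the common specification: max over split points i of distinct(s[:i]) + distinct(s[i:])
def bestSpec (w : List Char) : Int :=
  (List.range w.length).foldl (fun m i => max m (dcount (w.take i) + dcount (w.drop i))) 0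

theorem dcount_congr (l l' : List Char) (h : ∀ x, x ∈ l ↔ x ∈ l') : dcount l = dcount l' := by
  unfold dcount
  have hp : (PySem.Set.ofList l).Perm (PySem.Set.ofList l') := by
    rw [List.perm_ext_iff_of_nodup (PySem.Set.nodup_ofList l) (PySem.Set.nodup_ofList l')]
    intro x; simp [PySem.Set.mem_ofList, h x]
  exact congrArg (fun n : Nat => (n : Int)) hp.length_eq

theorem dcount_append_singleton (p : List Char) (c : Char) :
    dcount (p ++ [c]) = if c ∈ p then dcount p else dcount p + 1 := by
  unfold dcount
  rw [PySem.Set.ofList_append_singleton, PySem.Set.add_eq_ite]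
  by_cases h : c ∈ p
  · simp [PySem.Set.mem_ofList, h]
  · simp [PySem.Set.mem_ofList, h]

theorem dcount_cons (c : Char) (t : List Char) :
    dcount (c :: t) = if c ∈ t then dcount t else dcount t + 1 := by
  rw [dcount_congr (c :: t) (t ++ [c]) (by intro x; simp; tauto), dcount_append_singleton]

theorem dcount_reverse (l : List Char) : dcount l.reverse = dcount l :=
  dcount_congr _ _ (by intro x; simp)

-- A's helper, fully characterised: starting from the state reached after prefix p
theorem helperA_spec (l : List Char) : ∀ (p : List Char) (tracker : List Int),
    helperA l tracker (dcount p) (PySem.Set.ofList p)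
      = tracker ++ (List.range (l.length + 1)).map (fun i => dcount (p ++ l.take i)) := by
  induction l with
  | nil => intro p tracker; simp [helperA]
  | cons ch rest ih =>
    intro p tracker
    have hcont : (PySem.Set.contains (PySem.Set.ofList p) ch) = decide (ch ∈ p) := by
      by_cases h : ch ∈ p
      · simp [h]
      · simp only [decide_eq_false h, Bool.eq_false_iff]
        intro hc
        exact h ((PySem.Set.mem_ofList p ch).mp ((PySem.Set.contains_iff (PySem.Set.ofList p) ch).mp hc))
    have hstep : helperA (ch :: rest) tracker (dcount p) (PySem.Set.ofList p)
        = helperA rest (tracker ++ [dcount p]) (dcount (p ++ [ch])) (PySem.Set.ofList (p ++ [ch])) := by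
      rw [helperA, hcont, dcount_append_singleton, PySem.Set.ofList_append_singleton]
      by_cases h : ch ∈ p
      · rw [if_pos h, PySem.Set.add_of_mem ((PySem.Set.mem_ofList p ch).mpr h)]
        simp [h]
      · simp [h]
    rw [hstep, ih (p ++ [ch]) (tracker ++ [dcount p])]
    have hrange : List.range (rest.length + 1 + 1) = 0 :: (List.range (rest.length + 1)).map Nat.succ :=
      List.range_succ_eq_map
    simp only [List.length_cons, hrange, List.map_cons, List.map_map]
    simp [Function.comp, List.append_assoc, Nat.succ_eq_add_one]

-- instantiated at the empty prefix
theorem helperA_full (w : List Char) :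
    helperA w [] 0 PySem.Set.empty
      = (List.range (w.length + 1)).map (fun i => dcount (w.take i)) := by
  have := helperA_spec w [] []
  simpa using this

theorem toLeft_get (w : List Char) (i : Nat) (hi : i < w.length) :
    PySem.List.pyGetD ((List.range (w.length + 1)).map (fun j => dcount (w.take j))) (i : Int) 0
      = dcount (w.take i) := by
  rw [PySem.List.pyGetD_natCast]
  have h : i < ((List.range (w.length + 1)).map (fun j => dcount (w.take j))).length := by simp; omega
  rw [List.getD_eq_getElem _ _ h]
  simp

theorem toRight_get (w : List Char) (i : Nat) (hi : i < w.length) :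
    PySem.List.pyGetD (((List.range (w.reverse.length + 1)).map (fun j => dcount (w.reverse.take j))).reverse.dropLast) (i : Int) 0
      = dcount (w.drop i) := by
  rw [PySem.List.pyGetD_natCast]
  have h : i < (((List.range (w.reverse.length + 1)).map (fun j => dcount (w.reverse.take j))).reverse.dropLast).length := by
    simp; omega
  rw [List.getD_eq_getElem _ _ h]
  rw [List.getElem_dropLast, List.getElem_reverse]
  simp only [List.getElem_map, List.getElem_range, List.length_map, List.length_range, List.length_reverse]
  have harg : w.length + 1 - 1 - i = w.length - i := by omega
  rw [harg, show w.reverse.take (w.length - i) = (w.drop i).reverse from by rw [List.reverse_drop]]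
  exact dcount_reverse _

-- ===== A equals bestSpec =====
theorem solution_eq_bestSpec (s : String) : solution s = bestSpec s.toList := by
  unfold solution bestSpec
  rw [helperA_full, helperA_full, PySem.List.slice_to_neg_one, PySem.Str.len_eq, PySem.List.pyRange_one]
  simp only [sub_zero, Int.toNat_natCast]
  rw [List.foldl_map]
  apply PySem.List.foldl_congr_mem
  intro acc i hi
  have hin : i < s.toList.length := List.mem_range.mp hi
  rw [show (0 : Int) + (i : Int) = (i : Int) by ring]
  rw [toLeft_get _ _ hin, toRight_get _ _ hin]

-- ===== B-side lemmas =====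

-- index of the LAST occurrence of c in l (meaningful when c ∈ l)
def lastIdx (l : List Char) (c : Char) : Nat :=
  match l with
  | [] => 0
  | _ :: xs => if c ∈ xs then lastIdx xs c + 1 else 0

theorem lastFold_getD (l : List Char) : ∀ (s0 : Int) (d : PySem.Dict Char Int) (c : Char),
    ((PySem.List.enumerate l s0).foldl (fun d p => d.insert p.2 p.1) d).getD c (-1)
      = if c ∈ l then s0 + (lastIdx l c : Int) else d.getD c (-1) := by
  induction l with
  | nil => intro s0 d c; simp [PySem.List.enumerate_nil]
  | cons x xs ih =>
    intro s0 d c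
    rw [PySem.List.enumerate_cons, List.foldl_cons, ih]
    by_cases hxs : c ∈ xs
    · simp only [hxs, if_true, List.mem_cons, or_true, lastIdx]
      push_cast; ring
    · by_cases hx : c = x
      · subst hx
        simp [hxs, lastIdx, PySem.Dict.getD_insert_self]
      · simp only [hxs, if_false, List.mem_cons, hx, or_false]
        exact PySem.Dict.getD_insert_of_ne _ _ _ hx

theorem lastIdx_eq_iff (c : Char) (r : List Char) : ∀ (p : List Char),
    (lastIdx (p ++ c :: r) c = p.length ↔ c ∉ r) := by
  intro p
  induction p with
  | nil =>
    simp only [List.nil_append, lastIdx]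
    by_cases hc : c ∈ r
    · simp [hc]
    · simp [hc]
  | cons x p' ih =>
    have hmem : c ∈ p' ++ c :: r := by simp
    rw [List.cons_append, lastIdx, if_pos hmem, List.length_cons]
    constructor
    · intro h; exact ih.mp (by omega)
    · intro h; have := ih.mpr h; omega

-- the last-occurrence dict answers "is this the final occurrence?"
theorem lastD_getD_eq_iff (p r : List Char) (c : Char) :
    (((PySem.List.enumerate (p ++ c :: r) 0).foldl (fun d q => d.insert q.2 q.1)
        (PySem.Dict.empty : PySem.Dict Char Int)).getD c (-1) = (p.length : Int)) ↔ c ∉ r := by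
  rw [lastFold_getD]
  have hmem : c ∈ p ++ c :: r := by simp
  rw [if_pos hmem, zero_add, ← lastIdx_eq_iff c r p]
  exact ⟨fun h => by exact_mod_cast h, fun h => by exact_mod_cast h⟩

-- B's main loop invariant: processing the suffix r after prefix p
theorem bfold (w : List Char)
    (last : PySem.Dict Char Int)
    (hlast : last = (PySem.List.enumerate w 0).foldl (fun d p => d.insert p.2 p.1) PySem.Dict.empty) :
    ∀ (r p : List Char), w = p ++ r → ∀ (m : Int),
    ((PySem.List.enumerate r (p.length : Int)).foldl
      (fun (st : Int × PySem.Set Char × Int) q =>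
        (max st.1 (PySem.Set.len st.2.1 + st.2.2),
         PySem.Set.add st.2.1 q.2,
         if PySem.Dict.getD last q.2 (-1) == q.1 then st.2.2 - 1 else st.2.2))
      (m, PySem.Set.ofList p, dcount r)).1
    = (List.range r.length).foldl
        (fun acc j => max acc (dcount (w.take (p.length + j)) + dcount (w.drop (p.length + j)))) m := by
  intro r
  induction r with
  | nil => intro p hw m; simp [PySem.List.enumerate_nil]
  | cons ch r' ih =>
    intro p hw m
    rw [PySem.List.enumerate_cons, List.foldl_cons]
    have hlen : PySem.Set.len (PySem.Set.ofList p) = dcount p := by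
      simp [PySem.Set.len, dcount]
    have hcond : (PySem.Dict.getD last ch (-1) == (p.length : Int)) = decide (ch ∉ r') := by
      subst hlast hw
      by_cases h : ch ∈ r'
      · simp only [h, not_true_eq_false, decide_false, beq_eq_false_iff_ne, ne_eq]
        intro he
        exact ((lastD_getD_eq_iff p r' ch).mp he) h
      · simp [(lastD_getD_eq_iff p r' ch).mpr h, h]
    have hright : (if PySem.Dict.getD last ch (-1) == (p.length : Int) then dcount (ch :: r') - 1 else dcount (ch :: r')) = dcount r' := by
      rw [hcond, dcount_cons]
      by_cases h : ch ∈ r' <;> simp [h]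
    have hstate :
        (max m (PySem.Set.len (PySem.Set.ofList p) + dcount (ch :: r')),
         PySem.Set.add (PySem.Set.ofList p) ch,
         if PySem.Dict.getD last ch (-1) == (p.length : Int) then dcount (ch :: r') - 1 else dcount (ch :: r'))
        = (max m (dcount p + dcount (ch :: r')), PySem.Set.ofList (p ++ [ch]), dcount r') := by
      rw [hlen, hright, PySem.Set.ofList_append_singleton]
    rw [hstate]
    have hcast : ((p.length : Int) + 1) = ((p ++ [ch]).length : Int) := by simp
    rw [hcast, ih (p ++ [ch]) (by rw [hw]; simp)]
    rw [List.length_cons, List.range_succ_eq_map, List.foldl_cons, List.foldl_map]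
    have h0 : max m (dcount (w.take (p.length + 0)) + dcount (w.drop (p.length + 0)))
        = max m (dcount p + dcount (ch :: r')) := by
      subst hw
      rw [Nat.add_zero, List.take_left, List.drop_left]
    rw [h0]
    apply PySem.List.foldl_congr_mem
    intro acc j _
    have : (p ++ [ch]).length + j = p.length + Nat.succ j := by simp; omega
    rw [this]

-- ===== B equals bestSpec =====
theorem solution_alt_eq_bestSpec (s : String) : solution_alt s = bestSpec s.toList := by
  show ((PySem.List.enumerate s.toList 0).foldl _ (0, PySem.Set.empty, ((PySem.Set.ofList s.toList).length : Int))).1 = _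
  have h := bfold s.toList _ rfl s.toList [] rfl 0
  simp only [List.length_nil, Nat.cast_zero] at h
  rw [show (PySem.Set.empty : PySem.Set Char) = PySem.Set.ofList [] from rfl,
      show ((PySem.Set.ofList s.toList).length : Int) = dcount s.toList from rfl]
  rw [h]
  unfold bestSpec
  apply PySem.List.foldl_congr_mem
  intro acc j _
  rw [Nat.zero_add]

-- ===== VERDICT (by name: the statement is the Claim_ definition above) =====
theorem solution_spec : Claim_equal_solution := by
  intro s _
  unfold Spec_solution
  rw [solution_eq_bestSpec, solution_alt_eq_bestSpec]
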